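-- pv_equiv track=rewrite | github.com/isayaksh/Algorithm | BaekJoon/1068.py | solution
-- ===== SOURCE A (Python) =====
-- from collections import defaultdict
--
-- def solution(N, nodes, deleteNode):
--
--     answer = 0
--
--     # 트리 생성
--     tree = defaultdict(list)
--     for s, e in enumerate(nodes):
--         if s == deleteNode:
--             continue
--         tree[e].append(s)
--
--     # 최상위 부모 없는 경우
--     if not tree[-1]:
--         return 0
--
--     stack = [-1]
--     while stack:
--         node = stack.pop()
--         # 리프 노드
--         if not tree[node]:
--             answer += 1
--             continue
--         # 자식 노드 이동
--         for nextNode in tree[node]: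
--             stack.append(nextNode)
--     return answer
-- ===== SOURCE B (Python) =====
-- def solution(N, nodes, deleteNode):
--     # No adjacency structure at all: for each index, walk its parent pointers to decide
--     # whether it survives the deletion, and scan for children to decide whether it is a leaf.
--     n = len(nodes)
--
--     def survives(s):
--         cur = s
--         for _ in range(n + 1):
--             if cur == -1:
--                 return True
--             if cur == deleteNode or cur < 0 or cur >= n:
--                 return False
--             cur = nodes[cur]
--         return False
--
--     count = 0
--     for s in range(n):
--         if survives(s) and all(nodes[c] != s or c == deleteNode for c in range(n)):
--             count += 1
--     return count
-- ===== Notes on version B (the rewrite author's own statement) =====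
-- stated objective: alternative
-- what changed: B builds no adjacency structure and does no DFS at all: for each index it walks parent pointers upward to test whether it survives the deletion and scans the array for children to test whether it is a leaf, counting the survivors that are leaves; this trades A's linear stack traversal for a quadratic pointer-chasing scan.
import Mathlib
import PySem

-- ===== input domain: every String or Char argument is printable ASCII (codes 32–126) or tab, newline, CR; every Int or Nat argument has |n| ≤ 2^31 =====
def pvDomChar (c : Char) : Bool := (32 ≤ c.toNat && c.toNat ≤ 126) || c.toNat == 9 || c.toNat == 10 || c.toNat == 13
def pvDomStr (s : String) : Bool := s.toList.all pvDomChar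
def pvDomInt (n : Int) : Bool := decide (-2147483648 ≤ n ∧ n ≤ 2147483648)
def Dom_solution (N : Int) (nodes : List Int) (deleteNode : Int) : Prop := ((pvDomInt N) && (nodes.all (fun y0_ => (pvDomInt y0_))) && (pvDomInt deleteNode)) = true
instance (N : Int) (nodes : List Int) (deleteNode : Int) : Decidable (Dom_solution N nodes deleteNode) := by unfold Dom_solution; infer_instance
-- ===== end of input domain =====

-- B counts surviving leaves by walking parent pointers per index (no adjacency dict, no DFS); return value only.

-- ===== PORT A =====
-- The Python 'while stack' loop. The stack is kept top-first (Python appends/pops at the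
-- end; here push = cons at the head, pop = take the head — same LIFO discipline).
-- The loop is given fuel (nodes.length+2)^(nodes.length+2); each iteration pops once and the
-- total number of pops is bounded by this quantity (proved via the potential pvPhi below),
-- so the fuel never runs out and the 0-fuel branch is unreachable.
def pvLoopA (tree : PySem.Dict Int (List Int)) : Nat → List Int → Int → Int
  | 0, _, answer => answer
  | f+1, stack, answer =>
    match stack with
    | [] => answer
    | node :: rest =>
      if tree.getD node [] = [] then pvLoopA tree f rest (answer + 1)
      else pvLoopA tree f ((tree.getD node []).foldl (fun st c => c :: st) rest) answer

def solution (N : Int) (nodes : List Int) (deleteNode : Int) : Int :=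
  -- tree = defaultdict(list); for s, e in enumerate(nodes): if s == deleteNode: continue; tree[e].append(s)
  let tree := (PySem.List.enumerate nodes 0).foldl
    (fun d p => if p.1 == deleteNode then d else d.modify p.2 [] (· ++ [p.1])) PySem.Dict.empty
  -- if not tree[-1]: return 0
  if tree.getD (-1) [] = [] then 0
  else pvLoopA tree ((nodes.length + 2) ^ (nodes.length + 2)) [-1] 0

-- ===== PORT B =====
-- def survives(s): walk at most n+1 parent steps; True iff -1 is reached, False if the walk
-- hits deleteNode, leaves the index range, or runs out of steps.
-- nodes[cur] is accessed only under the guard 0 <= cur < n, so getD is exact there.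
def pvWalk (nodes : List Int) (deleteNode : Int) : Nat → Int → Bool
  | 0, _ => false
  | f+1, cur =>
    if cur = -1 then true
    else if cur = deleteNode ∨ cur < 0 ∨ (nodes.length : Int) ≤ cur then false
    else pvWalk nodes deleteNode f (nodes.getD cur.toNat 0)

-- all(nodes[c] != s or c == deleteNode for c in range(n)); indices in range, getD exact.
def pvNoChild (nodes : List Int) (deleteNode : Int) (s : Int) : Bool :=
  (List.range nodes.length).all (fun c => !(nodes.getD c 0 == s) || ((c : Int) == deleteNode))

def solution_alt (N : Int) (nodes : List Int) (deleteNode : Int) : Int :=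
  -- count = 0; for s in range(n): if survives(s) and all(...): count += 1
  (((List.range nodes.length).countP (fun s : Nat =>
      pvWalk nodes deleteNode (nodes.length + 1) (s : Int) &&
      pvNoChild nodes deleteNode (s : Int))) : Int)

-- ===== PRECONDITION & SPEC =====
def Spec_solution (N : Int) (nodes : List Int) (deleteNode : Int) (out : Int) : Prop := out = solution_alt N nodes deleteNode
instance (N : Int) (nodes : List Int) (deleteNode : Int) (out : Int) : Decidable (Spec_solution N nodes deleteNode out) := by unfold Spec_solution; infer_instance

-- ===== CLAIM (what is proved, stated in full; the proofs are below) =====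
def Claim_equal_solution : Prop := ∀ (N : Int) (nodes : List Int) (deleteNode : Int), Dom_solution N nodes deleteNode → Spec_solution N nodes deleteNode (solution N nodes deleteNode)

-- ===== LEMMAS AND PROOFS =====

-- children of m: the indices s ≠ deleteNode with nodes[s] = m, in index order
def pvC (nodes : List Int) (deleteNode : Int) (m : Int) : List Int :=
  ((PySem.List.enumerate nodes 0).filter (fun p => !(p.1 == deleteNode) && p.2 == m)).map (·.1)

def pvPar (nodes : List Int) (c : Int) : Int := nodes.getD c.toNat 0

-- pvQ k n: the parent chain from n reaches -1 in exactly k steps (n is "rooted" with rank k)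
def pvQ (nodes : List Int) (deleteNode : Int) : Nat → Int → Prop
  | 0, n => n = -1
  | k+1, c => ∃ n, c ∈ pvC nodes deleteNode n ∧ pvQ nodes deleteNode k n

-- recursive leaf count, the intermediary between A's stack loop and B's per-index scan
def pvDfs (tree : PySem.Dict Int (List Int)) : Nat → Int → Int
  | 0, _ => 0
  | f+1, node =>
    let cs := tree.getD node []
    if cs = [] then 1 else (cs.map (pvDfs tree f)).sum

def pvChain (nodes : List Int) : Nat → Int → List Int
  | 0, _ => []
  | k+1, n => n :: pvChain nodes k (pvPar nodes n)

noncomputable def pvRnk (nodes : List Int) (deleteNode : Int) (n : Int) : Nat :=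
  @dite _ (∃ k, pvQ nodes deleteNode k n) (Classical.dec _) (fun h => h.choose) (fun _ => 0)

noncomputable def pvPhi (nodes : List Int) (deleteNode : Int) (st : List Int) : Nat :=
  (st.map (fun n => (nodes.length + 2) ^ (nodes.length + 1 - pvRnk nodes deleteNode n))).sum

-- chain from s to target, step for step (deterministic variant of pvQ with any target)
def pvQto (nodes : List Int) (deleteNode : Int) (tgt : Int) : Nat → Int → Prop
  | 0, s => s = tgt
  | j+1, s => s ∈ pvC nodes deleteNode (pvPar nodes s) ∧ pvQto nodes deleteNode tgt j (pvPar nodes s)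

-- walk used only in proofs: pvWalk generalised to an arbitrary target
def pvWalkTo (nodes : List Int) (deleteNode tgt : Int) : Nat → Int → Bool
  | 0, _ => false
  | f+1, cur =>
    if cur = tgt then true
    else if cur = deleteNode ∨ cur < 0 ∨ (nodes.length : Int) ≤ cur then false
    else pvWalkTo nodes deleteNode tgt f (nodes.getD cur.toNat 0)

theorem pv_buildA (deleteNode m : Int) :
    ∀ (l : List (Int × Int)) (d : PySem.Dict Int (List Int)),
      (l.foldl (fun d p => if p.1 == deleteNode then d else d.modify p.2 [] (· ++ [p.1])) d).getD m []
        = d.getD m [] ++ (l.filter (fun p => !(p.1 == deleteNode) && p.2 == m)).map (·.1) := by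
  intro l
  induction l with
  | nil => intro d; simp
  | cons p l ih =>
    intro d
    by_cases hdel : p.1 == deleteNode
    · simp only [List.foldl_cons, if_pos hdel, List.filter_cons]
      rw [ih]
      simp [hdel]
    · simp only [List.foldl_cons, if_neg (by simp_all : ¬ (p.1 == deleteNode) = true), List.filter_cons]
      rw [ih]
      by_cases hm : p.2 = m
      · subst hm
        simp [hdel, PySem.Dict.getD_modify_self]
      · have : (PySem.Dict.modify d p.2 [] (· ++ [p.1])).getD m [] = d.getD m [] := by
          rw [PySem.Dict.getD_modify]
          simp [Ne.symm hm]
        simp [this, hdel, hm]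

theorem pv_mem_C {nodes : List Int} {deleteNode m c : Int} (h : c ∈ pvC nodes deleteNode m) :
    0 ≤ c ∧ c.toNat < nodes.length ∧ c ≠ deleteNode ∧ pvPar nodes c = m := by
  simp only [pvC, List.mem_map, List.mem_filter] at h
  obtain ⟨p, ⟨hp, hcond⟩, rfl⟩ := h
  rw [PySem.List.mem_enumerate_iff] at hp
  obtain ⟨k, hk, rfl⟩ := hp
  simp only [Bool.and_eq_true, Bool.not_eq_true', beq_eq_false_iff_ne, beq_iff_eq] at hcond
  refine ⟨by positivity, ?_, hcond.1, ?_⟩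
  · simpa using hk
  · simp only [pvPar, zero_add] at *
    rw [← hcond.2]
    simp [Int.toNat_natCast, List.getD_eq_getElem?_getD, List.getElem?_eq_getElem hk]

theorem pv_C_mem_iff {nodes : List Int} {deleteNode m c : Int} :
    c ∈ pvC nodes deleteNode m ↔
      0 ≤ c ∧ c.toNat < nodes.length ∧ c ≠ deleteNode ∧ pvPar nodes c = m := by
  constructor
  · exact pv_mem_C
  · rintro ⟨h0, hlt, hdel, hpar⟩
    simp only [pvC, List.mem_map, List.mem_filter]
    refine ⟨(c, nodes[c.toNat]), ⟨?_, ?_⟩, rfl⟩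
    · rw [PySem.List.mem_enumerate_iff]
      exact ⟨c.toNat, hlt, by simp [Int.toNat_of_nonneg h0]⟩
    · simp only [Bool.and_eq_true, Bool.not_eq_true', beq_eq_false_iff_ne, beq_iff_eq]
      refine ⟨hdel, ?_⟩
      rw [← hpar]
      simp [pvPar, List.getD_eq_getElem?_getD, List.getElem?_eq_getElem hlt]

theorem pv_length_C (nodes : List Int) (deleteNode m : Int) :
    (pvC nodes deleteNode m).length ≤ nodes.length := by
  have h1 : (pvC nodes deleteNode m).length ≤ (PySem.List.enumerate nodes 0).length := by
    simp only [pvC, List.length_map]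
    exact List.filter_sublist.length_le
  simpa [PySem.List.length_enumerate] using h1

theorem pv_C_nodup (nodes : List Int) (deleteNode m : Int) :
    (pvC nodes deleteNode m).Nodup := by
  have h := (PySem.List.pairwise_lt_enumerate nodes 0).filter
    (fun p => !(p.1 == deleteNode) && p.2 == m)
  exact (List.pairwise_map.mpr (h.imp fun hlt => ne_of_lt hlt))

theorem pv_Q_unique {nodes : List Int} {deleteNode : Int} :
    ∀ {k k' : Nat} {n : Int}, pvQ nodes deleteNode k n → pvQ nodes deleteNode k' n → k = k' := by
  intro k
  induction k with
  | zero =>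
    intro k' n h h'
    cases k' with
    | zero => rfl
    | succ j =>
      exfalso
      obtain ⟨p, hp, _⟩ := h'
      have := (pv_mem_C hp).1
      simp only [pvQ] at h
      omega
  | succ j ih =>
    intro k' n h h'
    cases k' with
    | zero =>
      exfalso
      obtain ⟨p, hp, _⟩ := h
      have := (pv_mem_C hp).1
      simp only [pvQ] at h'
      omega
    | succ j' =>
      obtain ⟨p, hp, hq⟩ := h
      obtain ⟨p', hp', hq'⟩ := h'
      have hpp : p = p' := (pv_mem_C hp).2.2.2 ▸ (pv_mem_C hp').2.2.2 ▸ rfl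
      subst hpp
      exact congrArg Nat.succ (ih hq hq')

theorem pv_Q_succ {nodes : List Int} {deleteNode : Int} {k : Nat} {c : Int}
    (h : pvQ nodes deleteNode (k+1) c) :
    c ∈ pvC nodes deleteNode (pvPar nodes c) ∧ pvQ nodes deleteNode k (pvPar nodes c) := by
  obtain ⟨n, hc, hq⟩ := h
  have := (pv_mem_C hc).2.2.2
  subst this
  exact ⟨hc, hq⟩

theorem pv_chain_length (nodes : List Int) : ∀ (k : Nat) (n : Int), (pvChain nodes k n).length = k := by
  intro k
  induction k with
  | zero => intro n; rfl
  | succ j ih => intro n; simp [pvChain, ih]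

theorem pv_chain_mem {nodes : List Int} {deleteNode : Int} :
    ∀ {k : Nat} {n : Int}, pvQ nodes deleteNode k n →
      ∀ m ∈ pvChain nodes k n, ∃ j, 1 ≤ j ∧ j ≤ k ∧ pvQ nodes deleteNode j m := by
  intro k
  induction k with
  | zero => intro n _ m hm; simp [pvChain] at hm
  | succ j ih =>
    intro n h m hm
    rcases List.mem_cons.mp hm with rfl | hm'
    · exact ⟨j+1, by omega, le_refl _, h⟩
    · obtain ⟨i, h1, h2, h3⟩ := ih (pv_Q_succ h).2 m hm'
      exact ⟨i, h1, by omega, h3⟩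

theorem pv_chain_nodup {nodes : List Int} {deleteNode : Int} :
    ∀ {k : Nat} {n : Int}, pvQ nodes deleteNode k n → (pvChain nodes k n).Nodup := by
  intro k
  induction k with
  | zero => intro n _; simp [pvChain]
  | succ j ih =>
    intro n h
    have hq' := (pv_Q_succ h).2
    refine List.nodup_cons.mpr ⟨?_, ih hq'⟩
    intro hmem
    obtain ⟨i, h1, h2, h3⟩ := pv_chain_mem hq' n hmem
    have : i = j + 1 := pv_Q_unique h3 h
    omega

theorem pv_Q_le {nodes : List Int} {deleteNode : Int} {k : Nat} {n : Int}
    (h : pvQ nodes deleteNode k n) : k ≤ nodes.length := by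
  have hnd := pv_chain_nodup h
  have hlen := pv_chain_length nodes k n
  have hsub : ∀ m ∈ pvChain nodes k n, m ∈ Finset.Ico (0:Int) (nodes.length:Int) := by
    intro m hm
    obtain ⟨j, h1, _, h3⟩ := pv_chain_mem h m hm
    obtain ⟨j', rfl⟩ : ∃ j', j = j' + 1 := ⟨j - 1, by omega⟩
    obtain ⟨hc, _⟩ := pv_Q_succ h3
    have := pv_mem_C hc
    simp only [Finset.mem_Ico]
    omega
  have := Finset.card_le_card (fun x hx => by
    rw [List.mem_toFinset] at hx; exact hsub x hx : (pvChain nodes k n).toFinset ⊆ _)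
  rw [List.toFinset_card_of_nodup hnd, hlen] at this
  simpa using this

theorem pv_rnk_eq {nodes : List Int} {deleteNode : Int} {k : Nat} {n : Int}
    (h : pvQ nodes deleteNode k n) : pvRnk nodes deleteNode n = k := by
  unfold pvRnk
  rw [dif_pos ⟨k, h⟩]
  exact pv_Q_unique (⟨k, h⟩ : ∃ k, pvQ nodes deleteNode k n).choose_spec h

theorem pv_dfs_stable {nodes : List Int} {deleteNode : Int} {t : PySem.Dict Int (List Int)}
    (hch : ∀ m, t.getD m [] = pvC nodes deleteNode m) :
    ∀ (d k : Nat) (n : Int) (f g : Nat), pvQ nodes deleteNode k n →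
      nodes.length - k ≤ d → nodes.length + 1 - k ≤ f → nodes.length + 1 - k ≤ g →
      pvDfs t f n = pvDfs t g n := by
  intro d
  induction d with
  | zero =>
    intro k n f g hq hd hf hg
    have hk := pv_Q_le hq
    have hCnil : pvC nodes deleteNode n = [] := by
      by_contra hne
      obtain ⟨c, hc⟩ := List.exists_mem_of_ne_nil _ hne
      have : pvQ nodes deleteNode (k+1) c := ⟨n, hc, hq⟩
      have := pv_Q_le this
      omega
    obtain ⟨f', rfl⟩ : ∃ f', f = f' + 1 := ⟨f - 1, by omega⟩
    obtain ⟨g', rfl⟩ : ∃ g', g = g' + 1 := ⟨g - 1, by omega⟩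
    simp [pvDfs, hch n, hCnil]
  | succ d ih =>
    intro k n f g hq hd hf hg
    have hk := pv_Q_le hq
    obtain ⟨f', rfl⟩ : ∃ f', f = f' + 1 := ⟨f - 1, by omega⟩
    obtain ⟨g', rfl⟩ : ∃ g', g = g' + 1 := ⟨g - 1, by omega⟩
    simp only [pvDfs, hch n]
    split_ifs with hc
    · rfl
    · refine congrArg List.sum (List.map_congr_left fun c hcmem => ?_)
      have hqc : pvQ nodes deleteNode (k+1) c := ⟨n, hcmem, hq⟩
      have hkc := pv_Q_le hqc
      exact ih (k+1) c f' g' hqc (by omega) (by omega) (by omega)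

theorem pv_cnt_unfold {nodes : List Int} {deleteNode : Int} {t : PySem.Dict Int (List Int)}
    (hch : ∀ m, t.getD m [] = pvC nodes deleteNode m) {k : Nat} {n : Int}
    (hq : pvQ nodes deleteNode k n) :
    pvDfs t (nodes.length + 1) n =
      if pvC nodes deleteNode n = [] then 1
      else ((pvC nodes deleteNode n).map (pvDfs t (nodes.length + 1))).sum := by
  rw [show pvDfs t (nodes.length + 1) n =
      (if t.getD n [] = [] then 1 else ((t.getD n []).map (pvDfs t nodes.length)).sum) from rfl]
  rw [hch n]
  split_ifs with hc
  · rfl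
  · refine congrArg List.sum (List.map_congr_left fun c hcmem => ?_)
    have hqc : pvQ nodes deleteNode (k+1) c := ⟨n, hcmem, hq⟩
    have hkc := pv_Q_le hqc
    exact pv_dfs_stable hch (nodes.length - (k+1)) (k+1) c _ _ hqc (by omega) (by omega) (by omega)

theorem pv_main {nodes : List Int} {deleteNode : Int} {t : PySem.Dict Int (List Int)}
    (hch : ∀ m, t.getD m [] = pvC nodes deleteNode m) :
    ∀ (f : Nat) (st : List Int) (a : Int),
      (∀ n ∈ st, ∃ k, pvQ nodes deleteNode k n) →
      pvPhi nodes deleteNode st ≤ f →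
      pvLoopA t f st a = a + (st.map (pvDfs t (nodes.length + 1))).sum := by
  intro f
  induction f with
  | zero =>
    intro st a hroot hphi
    have hst : st = [] := by
      cases st with
      | nil => rfl
      | cons n rest =>
        exfalso
        have : 1 ≤ (nodes.length + 2) ^ (nodes.length + 1 - pvRnk nodes deleteNode n) :=
          Nat.one_le_two_pow.trans (Nat.pow_le_pow_left (by omega) _)
        simp only [pvPhi, List.map_cons, List.sum_cons] at hphi
        omega
    subst hst
    simp [pvLoopA]
  | succ f ih =>
    intro st a hroot hphi
    cases st with
    | nil => simp [pvLoopA]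
    | cons n rest =>
      obtain ⟨k, hq⟩ := hroot n (List.mem_cons_self ..)
      have hk := pv_Q_le hq
      have hrnk := pv_rnk_eq hq
      simp only [pvLoopA, hch n]
      have hphi' : pvPhi nodes deleteNode (n :: rest)
          = (nodes.length + 2) ^ (nodes.length + 1 - k) + pvPhi nodes deleteNode rest := by
        simp [pvPhi, hrnk]
      by_cases hc : pvC nodes deleteNode n = []
      · rw [if_pos hc]
        have h1 : 1 ≤ (nodes.length + 2) ^ (nodes.length + 1 - k) :=
          Nat.one_le_two_pow.trans (Nat.pow_le_pow_left (by omega) _)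
        rw [ih rest (a+1) (fun m hm => hroot m (List.mem_cons_of_mem _ hm)) (by omega)]
        simp only [List.map_cons, List.sum_cons]
        rw [pv_cnt_unfold hch hq, if_pos hc]
        ring
      · rw [if_neg hc]
        set cs := pvC nodes deleteNode n with hcs
        have hst' : cs.foldl (fun s c => c :: s) rest = cs.reverse ++ rest :=
          List.foldl_flip_cons_eq_append'
        have hqc : ∀ c ∈ cs, pvQ nodes deleteNode (k+1) c := fun c hcm => ⟨n, hcm, hq⟩
        have hrnkc : ∀ c ∈ cs, pvRnk nodes deleteNode c = k + 1 := fun c hcm => pv_rnk_eq (hqc c hcm)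
        have hkc : k + 1 ≤ nodes.length := by
          obtain ⟨c, hcm⟩ := List.exists_mem_of_ne_nil _ hc
          exact pv_Q_le (hqc c hcm)
        have hpos : 1 ≤ (nodes.length + 2) ^ (nodes.length - k) :=
          Nat.one_le_two_pow.trans (Nat.pow_le_pow_left (by omega) _)
        have hmapconst : cs.reverse.map (fun m => (nodes.length + 2) ^ (nodes.length + 1 - pvRnk nodes deleteNode m))
            = List.replicate cs.length ((nodes.length + 2) ^ (nodes.length - k)) := by
          rw [List.map_congr_left (g := fun _ => (nodes.length + 2) ^ (nodes.length - k))
            (fun c hcm => by rw [hrnkc c (List.mem_reverse.mp hcm)]; congr 1; omega)]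
          simp [List.map_const']
        have hphieq : pvPhi nodes deleteNode (cs.reverse ++ rest)
            = cs.length * (nodes.length + 2) ^ (nodes.length - k) + pvPhi nodes deleteNode rest := by
          simp only [pvPhi, List.map_append, List.sum_append, hmapconst, List.sum_replicate,
            smul_eq_mul]
        have hlen : cs.length ≤ nodes.length := by
          rw [hcs]; exact pv_length_C nodes deleteNode n
        have h2 : cs.length * (nodes.length + 2) ^ (nodes.length - k) + 1
            ≤ (nodes.length + 2) ^ (nodes.length + 1 - k) := by
          have hpow : (nodes.length + 2) ^ (nodes.length + 1 - k)
              = (nodes.length + 2) * (nodes.length + 2) ^ (nodes.length - k) := by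
            rw [← pow_succ']
            congr 1
            omega
          rw [hpow]
          have hmul := Nat.mul_le_mul_right ((nodes.length + 2) ^ (nodes.length - k))
            (show cs.length + 1 ≤ nodes.length + 2 by omega)
          nlinarith
        rw [hphi'] at hphi
        have hphis : pvPhi nodes deleteNode (cs.foldl (fun s c => c :: s) rest) ≤ f := by
          rw [hst', hphieq]
          linarith
        rw [ih _ a (fun m hm => by
          rw [hst'] at hm
          rcases List.mem_append.mp hm with hm | hm
          · exact ⟨k+1, hqc m (List.mem_reverse.mp hm)⟩
          · exact hroot m (List.mem_cons_of_mem _ hm)) hphis]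
        rw [hst']
        simp only [List.map_cons, List.sum_cons]
        rw [pv_cnt_unfold hch hq, if_neg hc]
        simp only [List.map_append, List.sum_append, List.map_reverse, List.sum_reverse]
        ring

-- ===== B-side characterisation =====

theorem pv_Q_iff_Qto {nodes : List Int} {deleteNode : Int} :
    ∀ {k : Nat} {s : Int}, pvQ nodes deleteNode k s ↔ pvQto nodes deleteNode (-1) k s := by
  intro k s
  induction k generalizing s with
  | zero => simp [pvQ, pvQto]
  | succ j ih =>
    constructor
    · intro h
      obtain ⟨hc, hq⟩ := pv_Q_succ h
      exact ⟨hc, ih.mp hq⟩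
    · rintro ⟨hc, hq⟩
      exact ⟨pvPar nodes s, hc, ih.mpr hq⟩

theorem pv_walk_eq_walkTo (nodes : List Int) (deleteNode : Int) :
    ∀ (f : Nat) (c : Int), pvWalk nodes deleteNode f c = pvWalkTo nodes deleteNode (-1) f c := by
  intro f
  induction f with
  | zero => intro c; rfl
  | succ f ih => intro c; simp only [pvWalk, pvWalkTo, ih]

theorem pv_walkTo_iff {nodes : List Int} {deleteNode tgt : Int} :
    ∀ (f : Nat) (s : Int),
      pvWalkTo nodes deleteNode tgt f s = true ↔ ∃ j < f, pvQto nodes deleteNode tgt j s := by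
  intro f
  induction f with
  | zero => intro s; simp [pvWalkTo]
  | succ f ih =>
    intro s
    simp only [pvWalkTo]
    by_cases h1 : s = tgt
    · rw [if_pos h1]
      constructor
      · intro _; exact ⟨0, Nat.succ_pos f, h1⟩
      · intro _; rfl
    · rw [if_neg h1]
      by_cases h2 : s = deleteNode ∨ s < 0 ∨ (nodes.length : Int) ≤ s
      · rw [if_pos h2]
        constructor
        · intro h; exact absurd h (by simp)
        · rintro ⟨j, hj, hq⟩
          exfalso
          cases j with
          | zero => exact h1 hq
          | succ j' =>
            obtain ⟨hc, _⟩ := hq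
            obtain ⟨h0, hlt, hdel, _⟩ := pv_mem_C hc
            rcases h2 with h2 | h2 | h2
            · exact hdel h2
            · omega
            · omega
      · rw [if_neg h2]
        push_neg at h2
        obtain ⟨hdel, h0, hlt⟩ := h2
        have hmem : s ∈ pvC nodes deleteNode (pvPar nodes s) :=
          pv_C_mem_iff.mpr ⟨h0, by omega, hdel, rfl⟩
        rw [ih]
        constructor
        · rintro ⟨j, hj, hq⟩
          exact ⟨j+1, by omega, hmem, hq⟩
        · rintro ⟨j, hj, hq⟩
          cases j with
          | zero => exact absurd hq h1
          | succ j' => exact ⟨j', by omega, hq.2⟩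

theorem pv_Qto_trans {nodes : List Int} {deleteNode tgt r : Int} :
    ∀ {j : Nat} {s : Int}, pvQto nodes deleteNode tgt j s →
      ∀ {km : Nat}, pvQto nodes deleteNode r km tgt → pvQto nodes deleteNode r (km + j) s := by
  intro j s hj
  induction j generalizing s with
  | zero =>
    intro km hkm
    have : s = tgt := hj
    subst this
    simpa using hkm
  | succ j ih =>
    intro km hkm
    exact ⟨hj.1, ih hj.2 hkm⟩

theorem pv_Qto_decomp {nodes : List Int} {deleteNode tgt : Int} :
    ∀ {j : Nat} {s : Int}, pvQto nodes deleteNode tgt (j+1) s →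
      ∃ c ∈ pvC nodes deleteNode tgt, pvQto nodes deleteNode c j s := by
  intro j s h
  induction j generalizing s with
  | zero =>
    obtain ⟨hc, hq⟩ := h
    have : pvPar nodes s = tgt := hq
    exact ⟨s, this ▸ hc, rfl⟩
  | succ j ih =>
    obtain ⟨hc, hq⟩ := h
    obtain ⟨c, hcm, hq'⟩ := ih hq
    exact ⟨c, hcm, hc, hq'⟩

theorem pv_Qto_snoc {nodes : List Int} {deleteNode tgt c : Int}
    (hc : c ∈ pvC nodes deleteNode tgt) :
    ∀ {j : Nat} {s : Int}, pvQto nodes deleteNode c j s → pvQto nodes deleteNode tgt (j+1) s := by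
  intro j s h
  induction j generalizing s with
  | zero =>
    have : s = c := h
    subst this
    obtain ⟨_, _, _, hpar⟩ := pv_mem_C hc
    exact ⟨by rw [hpar]; exact hc, hpar⟩
  | succ j ih =>
    exact ⟨h.1, ih h.2⟩

theorem pv_Qto_det {nodes : List Int} {deleteNode : Int} :
    ∀ {j : Nat} {s c c' : Int}, pvQto nodes deleteNode c j s → pvQto nodes deleteNode c' j s → c = c' := by
  intro j
  induction j with
  | zero => intro s c c' h h'; exact h.symm.trans h'
  | succ j ih => intro s c c' h h'; exact ih h.2 h'.2

theorem pv_rank_add {nodes : List Int} {deleteNode m s : Int} {k' km j : Nat}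
    (hs : pvQ nodes deleteNode k' s) (hj : pvQto nodes deleteNode m j s)
    (hm : pvQ nodes deleteNode km m) : k' = km + j := by
  have h1 := pv_Qto_trans hj (pv_Q_iff_Qto.mp hm)
  exact pv_Q_unique hs (pv_Q_iff_Qto.mpr h1)

theorem pv_root_of_Qto {nodes : List Int} {deleteNode : Int} {j : Nat} {s : Int}
    (h : pvQto nodes deleteNode (-1) (j+1) s) : pvC nodes deleteNode (-1) ≠ [] := by
  obtain ⟨c, hcm, _⟩ := pv_Qto_decomp h
  exact List.ne_nil_of_mem hcm

theorem pv_noChild_iff (nodes : List Int) (deleteNode s : Int) :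
    pvNoChild nodes deleteNode s = true ↔ pvC nodes deleteNode s = [] := by
  unfold pvNoChild
  rw [List.all_eq_true]
  constructor
  · intro h
    by_contra hne
    obtain ⟨c, hc⟩ := List.exists_mem_of_ne_nil _ hne
    obtain ⟨h0, hlt, hdel, hpar⟩ := pv_mem_C hc
    have hb := h c.toNat (List.mem_range.mpr hlt)
    have hget : nodes.getD c.toNat 0 = s := hpar
    rw [hget] at hb
    simp only [beq_self_eq_true, Bool.not_true, Bool.false_or, beq_iff_eq] at hb
    rw [Int.toNat_of_nonneg h0] at hb
    exact hdel hb
  · intro hC c hcr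
    rw [List.mem_range] at hcr
    by_cases hpc : nodes.getD c 0 = s
    · by_cases hcd : (c : Int) = deleteNode
      · simp [hcd]
      · exfalso
        have : (c : Int) ∈ pvC nodes deleteNode s := by
          apply pv_C_mem_iff.mpr
          refine ⟨by positivity, by simpa using hcr, hcd, ?_⟩
          simpa [pvPar] using hpc
        rw [hC] at this
        simp at this
    · simp only [List.getD_eq_getElem?_getD] at hpc
      simp [hpc]

-- counting helpers
theorem pv_countP_or_disj {α : Type} (l : List α) (p q : α → Bool)
    (h : ∀ x ∈ l, ¬(p x = true ∧ q x = true)) :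
    l.countP (fun x => p x || q x) = l.countP p + l.countP q := by
  induction l with
  | nil => simp
  | cons a l ih =>
    have ha := h a (List.mem_cons_self ..)
    simp only [List.countP_cons]
    rw [ih (fun x hx => h x (List.mem_cons_of_mem _ hx))]
    cases hp : p a <;> cases hq : q a <;> simp_all <;> omega

theorem pv_countP_sum_disj {α β : Type} (cs : List α) (l : List β) (p : α → β → Bool)
    (hnd : cs.Nodup)
    (hdisj : ∀ x ∈ l, ∀ c ∈ cs, ∀ c' ∈ cs, p c x = true → p c' x = true → c = c') :
    (cs.map (fun c => (l.countP (p c)))).sum = l.countP (fun x => cs.any (fun c => p c x)) := by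
  induction cs with
  | nil => simp
  | cons c cs ih =>
    simp only [List.map_cons, List.sum_cons]
    rw [ih (List.nodup_cons.mp hnd).2
      (fun x hx c1 h1 c2 h2 => hdisj x hx c1 (List.mem_cons_of_mem _ h1) c2 (List.mem_cons_of_mem _ h2))]
    rw [← pv_countP_or_disj l (p c) (fun x => cs.any (fun c' => p c' x)) (fun x hx hpq => by
      obtain ⟨hp1, hp2⟩ := hpq
      obtain ⟨c', hc', hp'⟩ := List.any_eq_true.mp hp2
      have : c = c' := hdisj x hx c (List.mem_cons_self ..) c' (List.mem_cons_of_mem _ hc') hp1 hp'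
      exact (List.nodup_cons.mp hnd).1 (this ▸ hc'))]
    apply List.countP_congr
    intro x _
    simp [List.any_cons]

theorem pv_sum_cast {α : Type} (cs : List α) (f : α → Nat) :
    (cs.map (fun c => ((f c : Nat) : Int))).sum = (((cs.map f).sum : Nat) : Int) := by
  induction cs with
  | nil => simp
  | cons a l ih => simp [ih]

theorem pv_countP_singleton {β : Type} [DecidableEq β] (l : List β) (p : β → Bool) (a : β)
    (hnd : l.Nodup) (ha : a ∈ l) (hp : ∀ x ∈ l, (p x = true ↔ x = a)) :
    l.countP p = 1 := by
  induction l with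
  | nil => simp at ha
  | cons b l ih =>
    simp only [List.countP_cons]
    rcases List.mem_cons.mp ha with heq | ha'
    · have hb : p b = true := (hp b (List.mem_cons_self ..)).mpr heq.symm
      have hz : l.countP p = 0 := List.countP_eq_zero.mpr (fun x hx hpx => by
        have hxa := (hp x (List.mem_cons_of_mem _ hx)).mp hpx
        rw [hxa, heq] at hx
        exact (List.nodup_cons.mp hnd).1 hx)
      simp [hb, hz]
    · have hb : p b = false := by
        by_contra hbt
        have hba : b = a := (hp b (List.mem_cons_self ..)).mp (by simpa using hbt)
        subst hba
        exact (List.nodup_cons.mp hnd).1 ha'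
      rw [ih (List.nodup_cons.mp hnd).2 ha' (fun x hx => hp x (List.mem_cons_of_mem _ hx))]
      simp [hb]

-- the counted predicate, for a subtree root m
def pvPred (nodes : List Int) (deleteNode m : Int) (s : Nat) : Bool :=
  (pvWalk nodes deleteNode (nodes.length + 1) (s : Int) &&
    pvNoChild nodes deleteNode (s : Int)) &&
  pvWalkTo nodes deleteNode m (nodes.length + 1) (s : Int)

theorem pv_leaf_case {nodes : List Int} {deleteNode : Int} {t : PySem.Dict Int (List Int)}
    (hch : ∀ m, t.getD m [] = pvC nodes deleteNode m)
    (hroot : pvC nodes deleteNode (-1) ≠ []) {k : Nat} {m : Int}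
    (hq : pvQ nodes deleteNode k m) (hc : pvC nodes deleteNode m = []) :
    pvDfs t (nodes.length + 1) m
      = (((List.range nodes.length).countP (pvPred nodes deleteNode m)) : Int) := by
  rw [pv_cnt_unfold hch hq, if_pos hc]
  have hk := pv_Q_le hq
  obtain ⟨k', rfl⟩ : ∃ k', k = k' + 1 := by
    cases k with
    | zero =>
      exfalso
      have hm : m = -1 := hq
      exact hroot (hm ▸ hc)
    | succ k' => exact ⟨k', rfl⟩
  obtain ⟨hcm, _⟩ := pv_Q_succ hq
  obtain ⟨h0, hlt, _, _⟩ := pv_mem_C hcm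
  have hcast : ((m.toNat : Int)) = m := Int.toNat_of_nonneg h0
  have hcount : (List.range nodes.length).countP (pvPred nodes deleteNode m) = 1 := by
    apply pv_countP_singleton _ _ m.toNat List.nodup_range (List.mem_range.mpr hlt)
    intro s _
    constructor
    · intro hps
      have hps' := hps
      unfold pvPred at hps'
      simp only [Bool.and_eq_true] at hps'
      obtain ⟨⟨hw, hnc⟩, hwt⟩ := hps'
      obtain ⟨jm, _, hqm⟩ := (pv_walkTo_iff _ _).mp hwt
      cases jm with
      | zero =>
        have : (s : Int) = m := hqm
        omega
      | succ j' =>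
        exfalso
        obtain ⟨c, hcmem, _⟩ := pv_Qto_decomp hqm
        rw [hc] at hcmem
        simp at hcmem
    · rintro rfl
      unfold pvPred
      rw [hcast]
      simp only [Bool.and_eq_true]
      refine ⟨⟨?_, ?_⟩, ?_⟩
      · rw [pv_walk_eq_walkTo]
        exact (pv_walkTo_iff _ _).mpr ⟨k' + 1, by omega, pv_Q_iff_Qto.mp hq⟩
      · exact (pv_noChild_iff nodes deleteNode m).mpr hc
      · exact (pv_walkTo_iff _ _).mpr ⟨0, by omega, rfl⟩
  rw [hcount]
  rfl

theorem pv_dfs_count {nodes : List Int} {deleteNode : Int} {t : PySem.Dict Int (List Int)}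
    (hch : ∀ m, t.getD m [] = pvC nodes deleteNode m)
    (hroot : pvC nodes deleteNode (-1) ≠ []) :
    ∀ (d k : Nat) (m : Int), pvQ nodes deleteNode k m → nodes.length - k ≤ d →
      pvDfs t (nodes.length + 1) m
        = (((List.range nodes.length).countP (pvPred nodes deleteNode m)) : Int) := by
  intro d
  induction d with
  | zero =>
    intro k m hq hd
    have hk := pv_Q_le hq
    have hc : pvC nodes deleteNode m = [] := by
      by_contra hne
      obtain ⟨c, hcm⟩ := List.exists_mem_of_ne_nil _ hne
      have hq1 : pvQ nodes deleteNode (k+1) c := ⟨m, hcm, hq⟩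
      have := pv_Q_le hq1
      omega
    exact pv_leaf_case hch hroot hq hc
  | succ d ih =>
    intro k m hq hd
    by_cases hc : pvC nodes deleteNode m = []
    · exact pv_leaf_case hch hroot hq hc
    · rw [pv_cnt_unfold hch hq, if_neg hc]
      have hqc : ∀ c ∈ pvC nodes deleteNode m, pvQ nodes deleteNode (k+1) c :=
        fun c hcm => ⟨m, hcm, hq⟩
      have hmapeq : (pvC nodes deleteNode m).map (pvDfs t (nodes.length+1))
          = (pvC nodes deleteNode m).map (fun c =>
              (((List.range nodes.length).countP (pvPred nodes deleteNode c)) : Int)) :=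
        List.map_congr_left (fun c hcm => by
          have hkc := pv_Q_le (hqc c hcm)
          exact ih (k+1) c (hqc c hcm) (by omega))
      have hdisj : ∀ x ∈ List.range nodes.length, ∀ c1 ∈ pvC nodes deleteNode m,
          ∀ c2 ∈ pvC nodes deleteNode m, pvPred nodes deleteNode c1 x = true →
          pvPred nodes deleteNode c2 x = true → c1 = c2 := by
        intro x _ c1 h1 c2 h2 hp1 hp2
        unfold pvPred at hp1 hp2
        simp only [Bool.and_eq_true] at hp1 hp2
        obtain ⟨⟨hw1, _⟩, hwt1⟩ := hp1
        obtain ⟨⟨_, _⟩, hwt2⟩ := hp2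
        rw [pv_walk_eq_walkTo] at hw1
        obtain ⟨kx, _, hqx⟩ := (pv_walkTo_iff _ _).mp hw1
        obtain ⟨j1, _, hq1⟩ := (pv_walkTo_iff _ _).mp hwt1
        obtain ⟨j2, _, hq2⟩ := (pv_walkTo_iff _ _).mp hwt2
        have e1 := pv_rank_add (pv_Q_iff_Qto.mpr hqx) hq1 (hqc c1 h1)
        have e2 := pv_rank_add (pv_Q_iff_Qto.mpr hqx) hq2 (hqc c2 h2)
        have : j1 = j2 := by omega
        subst this
        exact pv_Qto_det hq1 hq2
      rw [hmapeq, pv_sum_cast,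
        pv_countP_sum_disj (pvC nodes deleteNode m) (List.range nodes.length)
          (fun c s => pvPred nodes deleteNode c s) (pv_C_nodup nodes deleteNode m) hdisj]
      congr 1
      apply List.countP_congr
      intro s _
      by_cases hw : pvWalk nodes deleteNode (nodes.length + 1) (s : Int) = true
      · by_cases hnc : pvNoChild nodes deleteNode (s : Int) = true
        · have hws := hw
          rw [pv_walk_eq_walkTo] at hws
          obtain ⟨kx, _, hqx⟩ := (pv_walkTo_iff _ _).mp hws
          have hqx' := pv_Q_iff_Qto.mpr hqx
          have hkx := pv_Q_le hqx'
          have hleaf : pvC nodes deleteNode (s : Int) = [] :=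
            (pv_noChild_iff nodes deleteNode (s : Int)).mp hnc
          constructor
          · intro hany
            obtain ⟨c, hcm, hpc⟩ := List.any_eq_true.mp hany
            unfold pvPred at hpc
            simp only [Bool.and_eq_true] at hpc
            obtain ⟨_, hwt⟩ := hpc
            obtain ⟨j1, _, hq1⟩ := (pv_walkTo_iff _ _).mp hwt
            have e1 := pv_rank_add hqx' hq1 (hqc c hcm)
            unfold pvPred
            simp only [Bool.and_eq_true]
            refine ⟨⟨hw, hnc⟩, ?_⟩
            exact (pv_walkTo_iff _ _).mpr ⟨j1 + 1, by omega, pv_Qto_snoc hcm hq1⟩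
          · intro hpm
            unfold pvPred at hpm
            simp only [Bool.and_eq_true] at hpm
            obtain ⟨_, hwt⟩ := hpm
            obtain ⟨jm, hjm, hqm⟩ := (pv_walkTo_iff _ _).mp hwt
            cases jm with
            | zero =>
              exfalso
              have : (s : Int) = m := hqm
              rw [this] at hleaf
              exact hc hleaf
            | succ j' =>
              obtain ⟨c, hcm, hq'⟩ := pv_Qto_decomp hqm
              refine List.any_eq_true.mpr ⟨c, hcm, ?_⟩
              unfold pvPred
              simp only [Bool.and_eq_true]
              refine ⟨⟨hw, hnc⟩, ?_⟩
              exact (pv_walkTo_iff _ _).mpr ⟨j', by omega, hq'⟩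
        · have hfalse : ∀ c : Int, pvPred nodes deleteNode c s = false := by
            intro c
            unfold pvPred
            simp [Bool.eq_false_iff.mpr hnc]
          simp [hfalse]
      · have hfalse : ∀ c : Int, pvPred nodes deleteNode c s = false := by
          intro c
          unfold pvPred
          simp [Bool.eq_false_iff.mpr hw]
        simp [hfalse]

-- ===== VERDICT (by name: the statement is the Claim_ definition above) =====
theorem solution_spec : Claim_equal_solution := by
  intro N nodes deleteNode _
  unfold Spec_solution solution solution_alt
  have hA : ∀ m, ((PySem.List.enumerate nodes 0).foldl
      (fun d p => if p.1 == deleteNode then d else d.modify p.2 [] (· ++ [p.1]))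
      PySem.Dict.empty).getD m [] = pvC nodes deleteNode m := by
    intro m
    rw [pv_buildA deleteNode m]
    simp [pvC]
  simp only [hA]
  by_cases hroot : pvC nodes deleteNode (-1) = []
  · rw [if_pos hroot]
    have hz : (List.range nodes.length).countP (fun s : Nat =>
        pvWalk nodes deleteNode (nodes.length + 1) (s : Int) &&
        pvNoChild nodes deleteNode (s : Int)) = 0 := by
      rw [List.countP_eq_zero]
      intro s _ hp
      simp only [Bool.and_eq_true] at hp
      obtain ⟨hw, _⟩ := hp
      rw [pv_walk_eq_walkTo] at hw
      obtain ⟨j, _, hqj⟩ := (pv_walkTo_iff _ _).mp hw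
      cases j with
      | zero =>
        have : ((s : Int)) = -1 := hqj
        omega
      | succ j' => exact pv_root_of_Qto hqj hroot
    rw [hz]
    rfl
  · rw [if_neg hroot]
    have hq0 : pvQ nodes deleteNode 0 (-1) := rfl
    have hphi : pvPhi nodes deleteNode [-1] ≤ (nodes.length + 2) ^ (nodes.length + 2) := by
      simp only [pvPhi, List.map_cons, List.map_nil, List.sum_cons, List.sum_nil,
        pv_rnk_eq hq0, Nat.add_zero, Nat.sub_zero]
      exact Nat.pow_le_pow_right (by omega) (by omega)
    rw [pv_main hA ((nodes.length + 2) ^ (nodes.length + 2)) [-1] 0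
      (fun n hn => by simp only [List.mem_singleton] at hn; exact hn ▸ ⟨0, hq0⟩) hphi]
    simp only [List.map_cons, List.map_nil, List.sum_cons, List.sum_nil, add_zero, zero_add]
    rw [pv_dfs_count hA hroot nodes.length 0 (-1) hq0 (by omega)]
    congr 1
    apply List.countP_congr
    intro s _
    unfold pvPred
    rw [← pv_walk_eq_walkTo]
    cases pvWalk nodes deleteNode (nodes.length + 1) (s : Int) <;> simp
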